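-- pv_equiv track=rewrite | github.com/Floorp-Projects/Floorp | testing/taskcluster/taskcluster_graph/commit_parser.py | escape_whitspace_in_brackets
-- ===== SOURCE A (Python) =====
-- def escape_whitspace_in_brackets(input_str):
--     '''
--     In tests you may restrict them by platform [] inside of the brackets
--     whitespace may occur this is typically invalid shell syntax so we escape it
--     with backslash sequences    .
--     '''
--     result = ""
--     in_brackets = False
--     for char in input_str:
--         if char == '[':
--             in_brackets = True
--             result += char
--             continue
--
--         if char == ']':
--             in_brackets = False
--             result += char
--             continue
--
--         if char == ' ' and in_brackets:
--             result += '\ '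
--             continue
--
--         result += char
--
--     return result
-- ===== SOURCE B (Python) =====
-- def escape_whitspace_in_brackets(input_str):
--     # Split on '[': the text up to the first ']' of each subsequent chunk is
--     # "inside brackets"; escape its spaces there, then stitch back with '['.
--     parts = input_str.split('[')
--     pieces = [parts[0]]
--     for part in parts[1:]:
--         head, sep, tail = part.partition(']')
--         pieces.append(head.replace(' ', '\\ ') + sep + tail)
--     return '['.join(pieces)
-- ===== Notes on version B (the rewrite author's own statement) =====
-- stated objective: faster
-- what changed: Replaced the char-by-char state-machine loop (boolean in_brackets flag, string +=) with a segment-level pass: split on '[', escape spaces in each chunk's part before its first ']' via partition/replace, and rejoin with '['.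
import Mathlib
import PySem

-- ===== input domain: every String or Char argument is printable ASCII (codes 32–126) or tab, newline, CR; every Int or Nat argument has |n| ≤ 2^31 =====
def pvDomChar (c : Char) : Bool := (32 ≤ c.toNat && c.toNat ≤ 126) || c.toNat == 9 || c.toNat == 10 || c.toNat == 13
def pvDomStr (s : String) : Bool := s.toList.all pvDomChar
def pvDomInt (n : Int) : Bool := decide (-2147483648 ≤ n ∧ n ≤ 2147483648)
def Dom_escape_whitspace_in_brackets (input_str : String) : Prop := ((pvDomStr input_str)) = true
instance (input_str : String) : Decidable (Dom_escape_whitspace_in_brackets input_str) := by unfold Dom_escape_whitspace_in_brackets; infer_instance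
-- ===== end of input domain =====

-- B replaces A's char-by-char state-machine loop with split('[') / partition(']') /
-- replace / join over whole segments (alternative decomposition; measurably faster in
-- CPython by a constant factor).


-- ===== PORT A =====
-- one loop step of A: branches in A's order, state = (result so far, in_brackets)
def pvStepA (st : List Char × Bool) (c : Char) : List Char × Bool :=
  if c = '[' then (st.1 ++ [c], true)
  else if c = ']' then (st.1 ++ [c], false)
  else if c = ' ' ∧ st.2 then (st.1 ++ ['\\', ' '], st.2)
  else (st.1 ++ [c], st.2)

def escape_whitspace_in_brackets (input_str : String) : String :=
  String.mk (input_str.toList.foldl pvStepA ([], false)).1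

-- ===== PORT B =====
-- hand port of Python's part.partition(']') for the one-char separator ']' (exact:
-- split at the FIRST ']'; if absent, (part, '', '')), returned as (head, sep, tail)
def pvPartition (cs : List Char) : List Char × List Char × List Char :=
  match cs with
  | [] => ([], [], [])
  | c :: t =>
    if c = ']' then ([], [']'], t)
    else
      let r := pvPartition t
      (c :: r.1, r.2.1, r.2.2)

-- the loop body of Source B: head.replace(' ', '\ ') + sep + tail
def pvProc (part : List Char) : List Char :=
  let p := pvPartition part
  PySem.Chars.replace p.1 [' '] ['\\', ' '] ++ p.2.1 ++ p.2.2

def escape_whitspace_in_brackets_alt (input_str : String) : String :=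
  match PySem.Chars.splitOn input_str.toList ['['] with
  | [] => ""   -- unreachable: str.split never yields an empty list
  | p0 :: rest => String.mk (PySem.Chars.join ['['] (p0 :: rest.map pvProc))

-- ===== PRECONDITION & SPEC =====
def Spec_escape_whitspace_in_brackets (input_str : String) (out : String) : Prop := out = escape_whitspace_in_brackets_alt input_str
instance (input_str : String) (out : String) : Decidable (Spec_escape_whitspace_in_brackets input_str out) := by unfold Spec_escape_whitspace_in_brackets; infer_instance

-- ===== CLAIM (what is proved, stated in full; the proofs are below) =====
def Claim_equal_escape_whitspace_in_brackets : Prop := ∀ (input_str : String), Dom_escape_whitspace_in_brackets input_str → Spec_escape_whitspace_in_brackets input_str (escape_whitspace_in_brackets input_str)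

-- ===== LEMMAS AND PROOFS =====

-- the state machine's output, written as a direct recursion (proof-side middle ground)
def pvG (b : Bool) : List Char → List Char
  | [] => []
  | c :: t =>
    if c = '[' then c :: pvG true t
    else if c = ']' then c :: pvG false t
    else if c = ' ' ∧ b then '\\' :: ' ' :: pvG b t
    else c :: pvG b t

-- the final in_brackets flag after a list of chars
def pvB (b : Bool) : List Char → Bool
  | [] => b
  | c :: t => if c = '[' then pvB true t else if c = ']' then pvB false t else pvB b t

-- cs.replace(' ', '\ '), written as a direct recursion
def pvEsc : List Char → List Char
  | [] => []
  | c :: t => if c = ' ' then '\\' :: ' ' :: pvEsc t else c :: pvEsc t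

-- cs.split('['), written as a direct recursion
def pvSplit1 : List Char → List (List Char)
  | [] => [[]]
  | c :: t =>
    if c = '[' then [] :: pvSplit1 t
    else
      match pvSplit1 t with
      | [] => [[c]]     -- unreachable
      | h :: r => (c :: h) :: r

def pvProcE (p : List Char) : List Char :=
  let q := pvPartition p
  pvEsc q.1 ++ q.2.1 ++ q.2.2

def pvF (r : List (List Char)) : List Char := r.flatMap (fun p => '[' :: pvProcE p)

theorem pvFoldA (l : List Char) : ∀ (acc : List Char) (b : Bool),
    l.foldl pvStepA (acc, b) = (acc ++ pvG b l, pvB b l) := by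
  induction l with
  | nil => intro acc b; simp [pvG, pvB]
  | cons c t ih =>
    intro acc b
    by_cases h1 : c = '['
    · simp [pvStepA, pvG, pvB, h1, ih]
    · by_cases h2 : c = ']'
      · simp [pvStepA, pvG, pvB, h1, h2, ih]
      · by_cases h3 : c = ' ' ∧ b
        · simp [pvStepA, pvG, pvB, h1, h2, h3, ih]
        · simp [pvStepA, pvG, pvB, h1, h2, h3, ih]

theorem pvReplaceGo (fuel : Nat) : ∀ (l acc : List Char), l.length ≤ fuel →
    PySem.Chars.replace.go [' '] ['\\', ' '] fuel l acc = acc.reverse ++ pvEsc l := by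
  induction fuel with
  | zero =>
    intro l acc h
    have : l = [] := List.length_eq_zero_iff.mp (Nat.le_zero.mp h)
    subst this; simp [PySem.Chars.replace.go, pvEsc]
  | succ n ih =>
    intro l acc h
    match l with
    | [] => simp [PySem.Chars.replace.go, pvEsc]
    | c :: t =>
      by_cases hc : c = ' '
      · subst hc
        have hp : [' '].isPrefixOf (' ' :: t) = true := by simp [List.isPrefixOf]
        simp only [PySem.Chars.replace.go, hp, if_pos, List.length_cons, List.length_nil,
          List.drop_succ_cons, List.drop_zero]
        rw [ih t _ (by simpa using Nat.le_of_succ_le_succ h)]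
        simp [pvEsc]
      · have hp : [' '].isPrefixOf (c :: t) = false := by
          simp [List.isPrefixOf]; exact fun h' => (hc h'.symm).elim
        simp only [PySem.Chars.replace.go, hp, Bool.false_eq_true, if_false]
        rw [ih t _ (by simpa using Nat.le_of_succ_le_succ h)]
        simp [pvEsc, hc]

theorem pvReplaceEq (l : List Char) :
    PySem.Chars.replace l [' '] ['\\', ' '] = pvEsc l := by
  simp only [PySem.Chars.replace, List.isEmpty_cons, Bool.false_eq_true, if_false]
  simpa using pvReplaceGo l.length l [] (le_refl _)

theorem pvSplit1_ne_nil (l : List Char) : pvSplit1 l ≠ [] := by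
  match l with
  | [] => simp [pvSplit1]
  | c :: t =>
    by_cases h : c = '['
    · simp [pvSplit1, h]
    · simp only [pvSplit1, h, if_false]
      cases pvSplit1 t <;> simp

theorem pvSplitGo (fuel : Nat) : ∀ (l cur : List Char) (acc : List (List Char)), l.length < fuel →
    PySem.Chars.splitOn.go ['['] fuel l cur acc
      = acc.reverse ++ (cur.reverse ++ (pvSplit1 l).headD []) :: (pvSplit1 l).tail := by
  induction fuel with
  | zero => intro l cur acc h; exact absurd h (Nat.not_lt_zero _)
  | succ n ih =>
    intro l cur acc h
    match l with
    | [] => simp [PySem.Chars.splitOn.go, pvSplit1]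
    | c :: t =>
      obtain ⟨h', r', hr⟩ : ∃ h' r', pvSplit1 t = h' :: r' := by
        cases hq : pvSplit1 t with
        | nil => exact absurd hq (pvSplit1_ne_nil t)
        | cons a b => exact ⟨a, b, rfl⟩
      by_cases hc : c = '['
      · subst hc
        have hp : ['['].isPrefixOf ('[' :: t) = true := by simp [List.isPrefixOf]
        simp only [PySem.Chars.splitOn.go, hp, if_pos, List.length_cons, List.length_nil,
          List.drop_succ_cons, List.drop_zero]
        rw [ih t [] _ (by simpa using Nat.lt_of_succ_lt_succ h)]
        simp [pvSplit1, hr]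
      · have hp : ['['].isPrefixOf (c :: t) = false := by
          simp [List.isPrefixOf]; exact fun h' => (hc h'.symm).elim
        simp only [PySem.Chars.splitOn.go, hp, Bool.false_eq_true, if_false]
        rw [ih t (c :: cur) acc (by simpa using Nat.lt_of_succ_lt_succ h)]
        simp [pvSplit1, hc, hr]

theorem pvSplitEq (l : List Char) : PySem.Chars.splitOn l ['['] = pvSplit1 l := by
  unfold PySem.Chars.splitOn
  rw [pvSplitGo (l.length + 1) l [] [] (Nat.lt_succ_self _)]
  obtain ⟨h', r', hr⟩ : ∃ h' r', pvSplit1 l = h' :: r' := by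
    cases hq : pvSplit1 l with
    | nil => exact absurd hq (pvSplit1_ne_nil l)
    | cons a b => exact ⟨a, b, rfl⟩
  simp [hr]

theorem pvMain (l : List Char) : ∀ (h : List Char) (r : List (List Char)),
    pvSplit1 l = h :: r →
    pvG false l = h ++ pvF r ∧ pvG true l = pvProcE h ++ pvF r := by
  induction l with
  | nil =>
    intro h r he
    simp only [pvSplit1] at he
    injection he with h1 h2
    subst h1; subst h2
    simp [pvG, pvF, pvProcE, pvPartition, pvEsc]
  | cons c t ih =>
    intro h r he
    obtain ⟨h', r', hr⟩ : ∃ h' r', pvSplit1 t = h' :: r' := by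
      cases hq : pvSplit1 t with
      | nil => exact absurd hq (pvSplit1_ne_nil t)
      | cons a b => exact ⟨a, b, rfl⟩
    obtain ⟨ihF, ihT⟩ := ih h' r' hr
    by_cases hb : c = '['
    · subst hb
      simp only [pvSplit1, if_pos rfl] at he
      injection he with h1 h2
      subst h1; subst h2
      constructor
      · simp [pvG, pvF, hr, ihT]
      · simp [pvG, pvProcE, pvPartition, pvEsc, pvF, hr, ihT]
    · simp only [pvSplit1, hb, if_false, hr] at he
      injection he with h1 h2
      subst h1; subst h2
      by_cases hc : c = ']'
      · subst hc
        constructor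
        · simp [pvG, ihF]
        · simp [pvG, pvProcE, pvPartition, pvEsc, ihF]
      · constructor
        · simp [pvG, hb, hc, ihF]
        · by_cases hs : c = ' '
          · subst hs
            simp only [pvG, pvProcE, pvPartition, pvEsc]
            simp_all [pvG, pvProcE, pvPartition, pvEsc]
          · simp only [pvG, hb, hc, hs]
            simp_all [pvProcE, pvPartition, pvEsc, pvG, hb, hc, hs]

theorem pvJoinEq (xs : List (List Char)) : ∀ (x : List Char),
    PySem.Chars.join ['['] (x :: xs) = x ++ xs.flatMap (fun p => '[' :: p) := by
  induction xs with
  | nil => intro x; simp [PySem.Chars.join, List.intercalate]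
  | cons y ys ih =>
    intro x
    have := ih y
    simp only [PySem.Chars.join, List.intercalate] at this ⊢
    simp [List.intersperse, this]

-- ===== VERDICT (by name: the statement is the Claim_ definition above) =====
theorem escape_whitspace_in_brackets_spec : Claim_equal_escape_whitspace_in_brackets := by
  intro s _
  unfold Spec_escape_whitspace_in_brackets
  unfold escape_whitspace_in_brackets escape_whitspace_in_brackets_alt
  rw [pvFoldA, pvSplitEq]
  obtain ⟨h, r, hr⟩ : ∃ h r, pvSplit1 s.toList = h :: r := by
    cases hq : pvSplit1 s.toList with
    | nil => exact absurd hq (pvSplit1_ne_nil _)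
    | cons a b => exact ⟨a, b, rfl⟩
  rw [hr]
  simp only [pvJoinEq]
  have hmain := (pvMain s.toList h r hr).1
  have hproc : ∀ p, pvProc p = pvProcE p := by
    intro p; simp [pvProc, pvProcE, pvReplaceEq]
  simp only [List.nil_append, hmain]
  congr 1
  simp [pvF, List.flatMap_map, hproc]
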